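-- pv_equiv track=rewrite | github.com/zukito2010/goa-homeworks | level 078/homework/codewars.py | generate_C
-- ===== SOURCE A (Python) =====
-- def generate_C(size):
--     res = []
--     f_l = []
--     for _ in range(size):
--         f_l.append('C' * (5 * size))
--     for _ in range(size * 3):
--         res.append('C' * size)
--     res = f_l + res + f_l
--
--     return '\n'.join(res)
-- ===== SOURCE B (Python) =====
-- def generate_C(size):
--     rows = []
--     for i in range(5 * size):
--         width = 5 * size if (i < size or i >= 4 * size) else size
--         rows.append('C' * width)
--     return '\n'.join(rows)
-- ===== Notes on version B (the rewrite author's own statement) =====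
-- stated objective: simpler
-- what changed: Replaces A's two list-building loops plus list concatenation (f_l + res + f_l) with a single loop over all row indices that selects each row's width by an index branch.
import Mathlib
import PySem

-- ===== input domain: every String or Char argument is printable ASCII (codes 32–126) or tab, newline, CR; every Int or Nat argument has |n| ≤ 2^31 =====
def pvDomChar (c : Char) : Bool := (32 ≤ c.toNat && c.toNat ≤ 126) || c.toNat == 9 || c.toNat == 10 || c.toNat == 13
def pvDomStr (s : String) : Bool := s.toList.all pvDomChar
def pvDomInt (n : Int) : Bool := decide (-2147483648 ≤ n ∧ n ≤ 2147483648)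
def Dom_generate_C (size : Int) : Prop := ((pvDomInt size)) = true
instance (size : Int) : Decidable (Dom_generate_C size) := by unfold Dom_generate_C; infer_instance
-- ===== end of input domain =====

-- B: one index-driven loop over all 5*size rows with a width-selecting branch, replacing A's two loops + list concatenation (objective: simpler).


-- ===== PORT A =====
def generate_C (size : Int) : String :=
  let f_l : List String := (PySem.List.pyRange 0 size 1).foldl
    (fun acc _ => acc ++ [String.mk (PySem.List.pyRepeat ['C'] (5 * size))]) []
  let res : List String := (PySem.List.pyRange 0 (size * 3) 1).foldl
    (fun acc _ => acc ++ [String.mk (PySem.List.pyRepeat ['C'] size)]) []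
  PySem.Str.join "\n" (f_l ++ res ++ f_l)

-- ===== PORT B =====
def generate_C_alt (size : Int) : String :=
  PySem.Str.join "\n" ((PySem.List.pyRange 0 (5 * size) 1).foldl
    (fun acc i => acc ++ [String.mk (PySem.List.pyRepeat ['C']
      (if i < size ∨ 4 * size ≤ i then 5 * size else size))]) [])

-- ===== PRECONDITION & SPEC =====
def Spec_generate_C (size : Int) (out : String) : Prop := out = generate_C_alt size
instance (size : Int) (out : String) : Decidable (Spec_generate_C size out) := by unfold Spec_generate_C; infer_instance

-- ===== CLAIM (what is proved, stated in full; the proofs are below) =====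
def Claim_equal_generate_C : Prop := ∀ (size : Int), Dom_generate_C size → Spec_generate_C size (generate_C size)

-- ===== LEMMAS AND PROOFS =====

-- push-style foldl is a map
theorem pv_foldl_push {α β : Type} (f : α → β) (l : List α) (init : List β) :
    l.foldl (fun acc x => acc ++ [f x]) init = init ++ l.map f := by
  induction l generalizing init with
  | nil => simp
  | cons a t ih => simp [List.foldl, ih]

theorem pv_map_const_replicate {α β : Type} (c : β) (l : List α) :
    l.map (fun _ => c) = List.replicate l.length c := by
  induction l with
  | nil => rfl
  | cons a t ih => simp [List.map, List.replicate, ih]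

theorem pv_rows_eq (size : Int) :
    (PySem.List.pyRange 0 (5 * size) 1).map
      (fun i => String.mk (PySem.List.pyRepeat ['C']
        (if i < size ∨ 4 * size ≤ i then 5 * size else size)))
    = List.replicate size.toNat (String.mk (PySem.List.pyRepeat ['C'] (5 * size)))
      ++ List.replicate (size * 3).toNat (String.mk (PySem.List.pyRepeat ['C'] size))
      ++ List.replicate size.toNat (String.mk (PySem.List.pyRepeat ['C'] (5 * size))) := by
  by_cases h : size ≤ 0
  · rw [PySem.List.pyRange_one_eq_nil (by omega)]
    have h1 : size.toNat = 0 := by omega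
    have h2 : (size * 3).toNat = 0 := by nlinarith [Int.toNat_of_nonpos (z := size * 3) (by nlinarith)]
    simp [h1, Int.toNat_of_nonpos (show size * 3 ≤ 0 by nlinarith)]
  · push_neg at h
    rw [PySem.List.pyRange_one_append 0 size (5 * size) (by omega) (by omega),
        PySem.List.pyRange_one_append size (4 * size) (5 * size) (by omega) (by omega)]
    simp only [List.map_append]
    have e1 : (PySem.List.pyRange 0 size 1).map
        (fun i => String.mk (PySem.List.pyRepeat ['C']
          (if i < size ∨ 4 * size ≤ i then 5 * size else size)))
        = List.replicate size.toNat (String.mk (PySem.List.pyRepeat ['C'] (5 * size))) := by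
      rw [List.map_congr_left (g := fun _ => String.mk (PySem.List.pyRepeat ['C'] (5 * size)))
        (by intro i hi; rw [PySem.List.mem_pyRange_one] at hi; rw [if_pos (Or.inl (by omega))])]
      rw [pv_map_const_replicate, PySem.List.length_pyRange_one]
      congr 1; omega
    have e2 : (PySem.List.pyRange size (4 * size) 1).map
        (fun i => String.mk (PySem.List.pyRepeat ['C']
          (if i < size ∨ 4 * size ≤ i then 5 * size else size)))
        = List.replicate (size * 3).toNat (String.mk (PySem.List.pyRepeat ['C'] size)) := by
      rw [List.map_congr_left (g := fun _ => String.mk (PySem.List.pyRepeat ['C'] size))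
        (by intro i hi; rw [PySem.List.mem_pyRange_one] at hi
            rw [if_neg (by push_neg; omega)])]
      rw [pv_map_const_replicate, PySem.List.length_pyRange_one]
      congr 1; omega
    have e3 : (PySem.List.pyRange (4 * size) (5 * size) 1).map
        (fun i => String.mk (PySem.List.pyRepeat ['C']
          (if i < size ∨ 4 * size ≤ i then 5 * size else size)))
        = List.replicate size.toNat (String.mk (PySem.List.pyRepeat ['C'] (5 * size))) := by
      rw [List.map_congr_left (g := fun _ => String.mk (PySem.List.pyRepeat ['C'] (5 * size)))
        (by intro i hi; rw [PySem.List.mem_pyRange_one] at hi; rw [if_pos (Or.inr (by omega))])]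
      rw [pv_map_const_replicate, PySem.List.length_pyRange_one]
      congr 1; omega
    rw [e1, e2, e3, List.append_assoc]

-- ===== VERDICT (by name: the statement is the Claim_ definition above) =====
theorem generate_C_spec : Claim_equal_generate_C := by
  intro size _
  unfold Spec_generate_C generate_C generate_C_alt
  rw [pv_foldl_push, pv_foldl_push, pv_foldl_push, pv_rows_eq]
  rw [pv_map_const_replicate, pv_map_const_replicate,
      PySem.List.length_pyRange_one, PySem.List.length_pyRange_one]
  simp
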